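-- pv_equiv track=rewrite | github.com/mat701/BiCM | bicm/functions.py | vmotifs_from_adjacency_list
-- ===== SOURCE A (Python) =====
-- def vmotifs_from_adjacency_list(adj_list):
--     """
--     From the adjacency list returns an edgelist of the keys with the couples of nodes that share at least a common neighbor (v-motif),
--     weighted by the couples' v-motifs number.
--     adj_list values must be sets.
--     """
--     nodelist = list(adj_list.keys())
--     nodes_num = len(nodelist)
--     v_list = []
--     for node_i in range(nodes_num - 1):
--         first_node = nodelist[node_i]
--         for node_j in range(node_i + 1, nodes_num):
--             second_node = nodelist[node_j]
--             v_num = len(adj_list[first_node] & adj_list[second_node])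
--             if v_num > 0:
--                 v_list.append((first_node, second_node, v_num))
--     return v_list
-- ===== SOURCE B (Python) =====
-- def vmotifs_from_adjacency_list(adj_list):
--     """Inverted index: for each common neighbor, count incident node pairs once,
--     then emit the pairs ordered by node index -- no per-pair set intersections."""
--     nodes = list(adj_list)
--     n = len(nodes)
--     incident = {}
--     for i, node in enumerate(nodes):
--         for c in adj_list[node]:
--             incident.setdefault(c, []).append(i)
--     counts = {}
--     for inc in incident.values():
--         for a in range(len(inc) - 1):
--             for b in range(a + 1, len(inc)):
--                 p = inc[a] * n + inc[b]
--                 counts[p] = counts.get(p, 0) + 1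
--     v_list = []
--     for p in sorted(counts):
--         i, j = divmod(p, n)
--         v_list.append((nodes[i], nodes[j], counts[p]))
--     return v_list
-- ===== Notes on version B (the rewrite author's own statement) =====
-- stated objective: alternative
-- what changed: Replaces the all-pairs set-intersection scan by an inverted index: for each common neighbor, incident node-pair counts are accumulated in a dict keyed by flat pair index, then emitted in sorted key order (= A's index-lexicographic order).
import Mathlib
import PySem

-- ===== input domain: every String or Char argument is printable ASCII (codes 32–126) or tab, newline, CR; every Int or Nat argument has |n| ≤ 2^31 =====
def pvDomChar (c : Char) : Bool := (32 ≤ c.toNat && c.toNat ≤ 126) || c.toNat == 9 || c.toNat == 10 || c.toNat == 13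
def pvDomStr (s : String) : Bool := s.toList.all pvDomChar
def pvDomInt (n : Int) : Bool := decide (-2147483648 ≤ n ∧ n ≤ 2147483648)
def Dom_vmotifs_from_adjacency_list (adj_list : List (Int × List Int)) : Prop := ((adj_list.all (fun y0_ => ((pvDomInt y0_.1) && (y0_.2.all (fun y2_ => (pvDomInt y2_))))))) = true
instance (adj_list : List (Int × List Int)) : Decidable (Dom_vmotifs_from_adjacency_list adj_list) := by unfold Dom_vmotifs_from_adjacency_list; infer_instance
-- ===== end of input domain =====

-- B replaces the all-pairs set-intersection scan by an inverted index over common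
-- neighbors with a pair-count dict emitted in sorted key order (objective: alternative).
-- ===== PORT A =====
def vmotifs_from_adjacency_list (adj_list : List (Int × List Int)) : List (Int × Int × Int) :=
  let d := PySem.Dict.ofList (adj_list.map (fun p => (p.1, PySem.Set.ofList p.2)))
  let nodelist := d.keys
  let nodes_num : Int := nodelist.length
  (PySem.List.pyRange 0 (nodes_num - 1) 1).foldl (fun v_list node_i =>
    let first_node := PySem.List.pyGetD nodelist node_i 0
    (PySem.List.pyRange (node_i + 1) nodes_num 1).foldl (fun v_list node_j =>
      let second_node := PySem.List.pyGetD nodelist node_j 0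
      let v_num : Int := (PySem.Set.inter (d.getD first_node PySem.Set.empty) (d.getD second_node PySem.Set.empty)).length
      if v_num > 0 then v_list ++ [(first_node, second_node, v_num)] else v_list) v_list) []

-- ===== PORT B =====
def vmotifs_from_adjacency_list_alt (adj_list : List (Int × List Int)) : List (Int × Int × Int) :=
  let d := PySem.Dict.ofList (adj_list.map (fun p => (p.1, PySem.Set.ofList p.2)))
  let nodes := d.keys
  let n : Int := nodes.length
  let incident : PySem.Dict Int (List Int) :=
    (PySem.List.enumerate nodes).foldl (fun inc iv =>
      (d.getD iv.2 PySem.Set.empty).foldl (fun inc c => inc.modify c [] (· ++ [iv.1])) inc)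
      PySem.Dict.empty
  let counts : PySem.Dict Int Int :=
    incident.values.foldl (fun counts inc =>
      (PySem.List.pyRange 0 ((inc.length : Int) - 1) 1).foldl (fun counts a =>
        (PySem.List.pyRange (a + 1) (inc.length : Int) 1).foldl (fun counts b =>
          let p := PySem.List.pyGetD inc a 0 * n + PySem.List.pyGetD inc b 0
          counts.insert p (counts.getD p 0 + 1)) counts) counts) PySem.Dict.empty
  (PySem.List.sorted counts.keys (fun x => x) false).foldl (fun v_list p =>
    v_list ++ [(PySem.List.pyGetD nodes (PySem.Int.floordiv p n) 0,
                PySem.List.pyGetD nodes (PySem.Int.mod p n) 0, counts.getD p 0)]) []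

-- ===== PRECONDITION & SPEC =====
def Spec_vmotifs_from_adjacency_list (adj_list : List (Int × List Int)) (out : List (Int × Int × Int)) : Prop := out = vmotifs_from_adjacency_list_alt adj_list
instance (adj_list : List (Int × List Int)) (out : List (Int × Int × Int)) : Decidable (Spec_vmotifs_from_adjacency_list adj_list out) := by unfold Spec_vmotifs_from_adjacency_list; infer_instance

-- ===== CLAIM (what is proved, stated in full; the proofs are below) =====
def Claim_equal_vmotifs_from_adjacency_list : Prop := ∀ (adj_list : List (Int × List Int)), Dom_vmotifs_from_adjacency_list adj_list → Spec_vmotifs_from_adjacency_list adj_list (vmotifs_from_adjacency_list adj_list)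

-- ===== LEMMAS AND PROOFS =====

-- the ordered-pairs normal form: pvPairs g xs = the blocks g xs[a] xs[b] for all index pairs a < b, lexicographically
def pvPairs {α β : Type} (g : α → α → List β) : List α → List β
  | [] => []
  | x :: t => t.flatMap (g x) ++ pvPairs g t

theorem pvFlatMap_if {α β : Type} (l : List α) (p : α → Bool) (f : α → β) :
    l.flatMap (fun x => if p x then [f x] else []) = (l.filter p).map f := by
  induction l with
  | nil => simp
  | cons x t ih =>
    by_cases h : p x <;> simp [h, ih]

theorem pvFlatMap_single {α β : Type} (l : List α) (f : α → β) :
    l.flatMap (fun x => [f x]) = l.map f := by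
  induction l with
  | nil => rfl
  | cons a b ih => simp only [List.flatMap_cons, List.map_cons, ih, List.singleton_append]

theorem pvCountP_flatMap {α β : Type} (l : List α) (g : α → List β) (p : β → Bool) :
    (l.flatMap g).countP p = (l.map (fun x => (g x).countP p)).sum := by
  induction l with
  | nil => simp
  | cons x t ih => simp [List.countP_append, ih]

theorem pvRange_shift (a b : Int) :
    PySem.List.pyRange (a+1) (b+1) 1 = (PySem.List.pyRange a b 1).map (· + 1) := by
  rw [PySem.List.pyRange_one, PySem.List.pyRange_one, List.map_map]
  have h : b + 1 - (a + 1) = b - a := by ring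
  rw [h]
  congr 1
  funext k
  simp only [Function.comp_apply]
  ring

theorem pvGetD_cons (x : Int) (t : List Int) (z d : Int) (hz : 0 ≤ z) :
    PySem.List.pyGetD (x::t) (z+1) d = PySem.List.pyGetD t z d := by
  obtain ⟨k, rfl⟩ := Int.eq_ofNat_of_zero_le hz
  have h : ((k:Int)+1) = ((k+1:Nat):Int) := by push_cast; ring
  rw [h, PySem.List.pyGetD_natCast, PySem.List.pyGetD_natCast]
  simp

-- the double index-range loop of both ports IS a fold over the ordered-pairs list
theorem pvPairsLoop {γ : Type} (F : γ → Int → Int → γ) (xs : List Int) (dflt : Int) (init : γ) :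
    (PySem.List.pyRange 0 ((xs.length : Int) - 1) 1).foldl (fun acc a =>
      (PySem.List.pyRange (a+1) (xs.length : Int) 1).foldl (fun acc b =>
        F acc (PySem.List.pyGetD xs a dflt) (PySem.List.pyGetD xs b dflt)) acc) init
    = (pvPairs (fun x y => [(x,y)]) xs).foldl (fun acc q => F acc q.1 q.2) init := by
  induction xs generalizing init with
  | nil =>
    have h0 : PySem.List.pyRange 0 ((([]:List Int).length : Int) - 1) 1 = [] := by
      apply PySem.List.pyRange_one_eq_nil; simp
    rw [h0]
    simp [pvPairs]
  | cons x t ih =>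
    have hlen : (((x::t).length : Int)) - 1 = (t.length : Int) := by
      push_cast [List.length_cons]; ring
    rw [hlen]
    by_cases htn : t = []
    · subst htn
      have h0 : PySem.List.pyRange 0 ((([]:List Int).length : Int)) 1 = [] := by
        apply PySem.List.pyRange_one_eq_nil; simp
      rw [h0]
      simp [pvPairs]
    · have htl : (0:Int) < (t.length : Int) := by
        have : t.length ≠ 0 := fun h => htn (List.length_eq_zero_iff.mp h)
        omega
      rw [PySem.List.pyRange_one_cons htl, List.foldl_cons]
      -- head block: the inner loop at a = 0
      have hhead : (PySem.List.pyRange (0+1) (((x::t).length : Int)) 1).foldl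
            (fun acc b => F acc (PySem.List.pyGetD (x::t) 0 dflt)
              (PySem.List.pyGetD (x::t) b dflt)) init
          = t.foldl (fun acc y => F acc x y) init := by
        have hx0 : PySem.List.pyGetD (x::t) 0 dflt = x := by
          rw [show (0:Int) = ((0:Nat):Int) from rfl, PySem.List.pyGetD_natCast]; rfl
        rw [show ((0:Int)+1) = 1 from rfl]
        have hfold := PySem.List.foldl_pyRange_pyGetD' (xs := x::t) (d := dflt)
          (f := fun acc y => F acc x y) (a := 1) (init := init) (by norm_num)
        simp only [hx0]
        rw [hfold]
        rfl
      rw [hhead]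
      -- tail: reindex the remaining outer range by +1
      have hshift : PySem.List.pyRange 1 ((t.length:Int)) 1
          = (PySem.List.pyRange 0 ((t.length:Int)-1) 1).map (· + 1) := by
        have h := pvRange_shift 0 ((t.length:Int)-1)
        rw [show ((0:Int)+1) = 1 from rfl, show ((t.length:Int)-1)+1 = ((t.length:Int)) by ring] at h
        exact h
      rw [show ((0:Int)+1) = 1 from rfl, hshift, List.foldl_map]
      have hcong : ∀ (acc : γ) (k : Int), k ∈ PySem.List.pyRange 0 ((t.length:Int)-1) 1 →
          (PySem.List.pyRange ((k+1)+1) (((x::t).length : Int)) 1).foldl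
            (fun acc b => F acc (PySem.List.pyGetD (x::t) (k+1) dflt)
              (PySem.List.pyGetD (x::t) b dflt)) acc
          = (PySem.List.pyRange (k+1) ((t.length : Int)) 1).foldl
            (fun acc b => F acc (PySem.List.pyGetD t k dflt)
              (PySem.List.pyGetD t b dflt)) acc := by
        intro acc k hk
        have hk0 : 0 ≤ k := ((PySem.List.mem_pyRange_one).mp hk).1
        have hlen2 : (((x::t).length : Int)) = (t.length : Int) + 1 := by
          push_cast [List.length_cons]; ring
        rw [pvGetD_cons x t k dflt hk0, hlen2, pvRange_shift (k+1) ((t.length:Int)),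
          List.foldl_map]
        apply PySem.List.foldl_congr_mem
        intro acc2 b hb
        have hb0 : 0 ≤ b := by
          have := ((PySem.List.mem_pyRange_one).mp hb).1
          omega
        rw [pvGetD_cons x t b dflt hb0]
      refine Eq.trans (PySem.List.foldl_congr_mem _ _ _ _ hcong) ?_
      rw [ih]
      simp only [pvPairs]
      rw [List.foldl_append, pvFlatMap_single t (fun y => (x, y)), List.foldl_map]

theorem pvPairs_map (f : Int → Int) (l : List Int) :
    pvPairs (fun x y => [(x,y)]) (l.map f)
      = (pvPairs (fun x y => [(x,y)]) l).map (fun q => (f q.1, f q.2)) := by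
  induction l with
  | nil => simp [pvPairs]
  | cons x t ih => simp [pvPairs, ih, List.flatMap_map, List.map_flatMap]

theorem pvMem_pairs (xs : List Int) (h : xs.Pairwise (· < ·)) (q : Int × Int) :
    q ∈ pvPairs (fun x y => [(x,y)]) xs ↔ q.1 ∈ xs ∧ q.2 ∈ xs ∧ q.1 < q.2 := by
  induction xs with
  | nil => simp [pvPairs]
  | cons x t ih =>
    rw [List.pairwise_cons] at h
    obtain ⟨hx, ht⟩ := h
    simp only [pvPairs, List.mem_append, List.mem_flatMap, List.mem_cons, List.not_mem_nil,
      or_false, ih ht]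
    constructor
    · rintro (⟨y, hy, rfl⟩ | ⟨h1, h2, h3⟩)
      · exact ⟨Or.inl rfl, Or.inr hy, hx y hy⟩
      · exact ⟨Or.inr h1, Or.inr h2, h3⟩
    · rintro ⟨h1 | h1, h2 | h2, h3⟩
      · rw [h1, h2] at h3; exact absurd h3 (lt_irrefl x)
      · exact Or.inl ⟨q.2, h2, by rw [← h1]⟩
        
      · rw [h2] at h3; exact absurd (lt_trans (hx q.1 h1) h3) (lt_irrefl x)
      · exact Or.inr ⟨h1, h2, h3⟩

theorem pvPairs_pairwise (xs : List Int) (h : xs.Pairwise (· < ·)) :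
    (pvPairs (fun x y => [(x,y)]) xs).Pairwise
      (fun q r => q.1 < r.1 ∨ (q.1 = r.1 ∧ q.2 < r.2)) := by
  induction xs with
  | nil => simp [pvPairs]
  | cons x t ih =>
    rw [List.pairwise_cons] at h
    obtain ⟨hx, ht⟩ := h
    simp only [pvPairs]
    rw [List.pairwise_append]
    refine ⟨?_, ih ht, ?_⟩
    · rw [pvFlatMap_single t (fun y => (x, y)), List.pairwise_map]
      exact ht.imp (fun hab => Or.inr ⟨rfl, hab⟩)
    · intro p hp r hr
      simp only [List.mem_flatMap, List.mem_singleton] at hp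
      obtain ⟨y, _, rfl⟩ := hp
      have hr1 := ((pvMem_pairs t ht r).mp hr).1
      exact Or.inl (hx r.1 hr1)

theorem pvPairs_nodup (xs : List Int) (h : xs.Pairwise (· < ·)) :
    (pvPairs (fun x y => [(x,y)]) xs).Nodup := by
  refine (pvPairs_pairwise xs h).imp ?_
  rintro a b (hab | ⟨_, hab⟩) rfl <;> exact absurd hab (lt_irrefl _)

-- encoded pairs decode within bounds
theorem pvEnc_inj (n i j x y : Int) (hi : 0 ≤ i) (hj : 0 ≤ j) (hjn : j < n)
    (_hx : 0 ≤ x) (hy : 0 ≤ y) (hyn : y < n) (h : x*n+y = i*n+j) : x = i ∧ y = j := by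
  have h1 : x * n + y = i * n + j := h
  have hn : 0 < n := lt_of_le_of_lt hj hjn
  have hx' : x = i := by
    rcases lt_trichotomy x i with hlt | heq | hgt
    · exfalso; nlinarith
    · exact heq
    · exfalso; nlinarith
  constructor
  · exact hx'
  · subst hx'; omega

-- counting an encoded pair i*n+j among the encoded ordered pairs of a strictly increasing bounded list
theorem pvCount_pairs_enc (n i j : Int) (inc : List Int) (hp : inc.Pairwise (· < ·))
    (hb : ∀ x ∈ inc, 0 ≤ x ∧ x < n) (hi : 0 ≤ i) (hij : i < j) (hj : j < n) :
    ((pvPairs (fun x y => [(x,y)]) inc).map (fun q => q.1*n+q.2)).count (i*n+j)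
      = if i ∈ inc ∧ j ∈ inc then 1 else 0 := by
  have hnd := pvPairs_nodup inc hp
  rw [List.count, List.countP_map]
  have hcong : (pvPairs (fun x y => [(x,y)]) inc).countP
        ((fun p => p == i*n+j) ∘ (fun q => q.1*n+q.2))
      = (pvPairs (fun x y => [(x,y)]) inc).countP (fun q => q == (i, j)) := by
    apply List.countP_congr
    intro q hq
    obtain ⟨hq1, hq2, hq12⟩ := (pvMem_pairs inc hp q).mp hq
    obtain ⟨hb1, hb1n⟩ := hb q.1 hq1
    obtain ⟨hb2, hb2n⟩ := hb q.2 hq2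
    simp only [Function.comp_apply, beq_iff_eq]
    constructor
    · intro he
      obtain ⟨e1, e2⟩ := pvEnc_inj n i j q.1 q.2 hi (le_trans hi (le_of_lt hij)) hj hb1 hb2 hb2n he
      exact Prod.ext e1 e2
    · intro he; rw [he]
  rw [hcong]
  have : (pvPairs (fun x y => [(x,y)]) inc).countP (fun q => q == (i, j))
      = (pvPairs (fun x y => [(x,y)]) inc).count (i, j) := rfl
  rw [this, List.Nodup.count hnd]
  by_cases hmem : i ∈ inc ∧ j ∈ inc
  · rw [if_pos ((pvMem_pairs inc hp (i,j)).mpr ⟨hmem.1, hmem.2, hij⟩), if_pos hmem]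
  · rw [if_neg (fun hmm => hmem ⟨((pvMem_pairs inc hp (i,j)).mp hmm).1,
      ((pvMem_pairs inc hp (i,j)).mp hmm).2.1⟩), if_neg hmem]

-- ---- instance-level abbreviations (proof-side only) ----
def pvD (a : List (Int × List Int)) : PySem.Dict Int (PySem.Set Int) :=
  PySem.Dict.ofList (a.map (fun p => (p.1, PySem.Set.ofList p.2)))
def pvNodes (a : List (Int × List Int)) : List Int := (pvD a).keys
def pvN (a : List (Int × List Int)) : Int := ((pvNodes a).length : Int)
def pvNode (a : List (Int × List Int)) (i : Int) : Int := PySem.List.pyGetD (pvNodes a) i 0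
def pvS (a : List (Int × List Int)) (i : Int) : List Int := (pvD a).getD (pvNode a i) PySem.Set.empty
def pvWn (a : List (Int × List Int)) (i j : Int) : Nat := (PySem.Set.inter (pvS a i) (pvS a j)).length
def pvPL (a : List (Int × List Int)) : List (Int × Int) :=
  pvPairs (fun x y => [(x,y)]) (PySem.List.pyRange 0 (pvN a) 1)
def pvInc (a : List (Int × List Int)) (c : Int) : List Int :=
  (PySem.List.pyRange 0 (pvN a) 1).filter (fun i => decide (c ∈ pvS a i))
def pvC (a : List (Int × List Int)) : List Int :=
  PySem.Set.ofList ((PySem.List.pyRange 0 (pvN a) 1).flatMap (fun i => pvS a i))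
def pvLL (a : List (Int × List Int)) : List Int :=
  (pvC a).flatMap (fun c => (pvPairs (fun x y => [(x,y)]) (pvInc a c)).map (fun q => q.1 * pvN a + q.2))
def pvK (a : List (Int × List Int)) : List Int :=
  ((pvPL a).filter (fun q => decide (0 < pvWn a q.1 q.2))).map (fun q => q.1 * pvN a + q.2)
def pvIncident (a : List (Int × List Int)) : PySem.Dict Int (List Int) :=
  (PySem.List.enumerate (pvNodes a)).foldl (fun inc iv =>
    ((pvD a).getD iv.2 PySem.Set.empty).foldl (fun inc c => inc.modify c [] (· ++ [iv.1])) inc)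
    PySem.Dict.empty
def pvCounts (a : List (Int × List Int)) : PySem.Dict Int Int :=
  (pvIncident a).values.foldl (fun counts inc =>
    (PySem.List.pyRange 0 ((inc.length : Int) - 1) 1).foldl (fun counts a_ =>
      (PySem.List.pyRange (a_ + 1) ((inc.length : Int)) 1).foldl (fun counts b =>
        counts.insert (PySem.List.pyGetD inc a_ 0 * pvN a + PySem.List.pyGetD inc b 0)
          ((counts.getD (PySem.List.pyGetD inc a_ 0 * pvN a + PySem.List.pyGetD inc b 0) 0) + 1))
        counts) counts) PySem.Dict.empty

theorem pvS_nodup (a : List (Int × List Int)) (i : Int) : (pvS a i).Nodup := by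
  have aux : ∀ (l : List (Int × List Int)) (d : PySem.Dict Int (PySem.Set Int)),
      (∀ v ∈ d.values, List.Nodup v) →
      ∀ v ∈ (l.foldl (fun d p => d.insert p.1 (PySem.Set.ofList p.2)) d).values, List.Nodup v := by
    intro l
    induction l with
    | nil => intro d h; exact h
    | cons p t ih =>
      intro d h
      simp only [List.foldl_cons]
      apply ih
      intro v hv
      rcases PySem.Dict.mem_values_insert d p.1 (PySem.Set.ofList p.2) v hv with h1 | h1
      · rw [h1]; exact PySem.Set.nodup_ofList p.2
      · exact h v h1
  have hfold : pvD a = (a.map (fun p => (p.1, PySem.Set.ofList p.2))).foldl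
      (fun d p => d.insert p.1 p.2) PySem.Dict.empty := rfl
  have hfold2 : pvD a = a.foldl (fun d p => d.insert p.1 (PySem.Set.ofList p.2)) PySem.Dict.empty := by
    rw [hfold, List.foldl_map]
  have hvals : ∀ v ∈ (pvD a).values, List.Nodup v := by
    rw [hfold2]
    apply aux
    intro v hv
    simp [PySem.Dict.empty] at hv
  rcases hg : (pvD a).get? (pvNode a i) with _ | v
  · rw [pvS, PySem.Dict.getD_of_get?_eq_none _ _ hg]
    exact List.nodup_nil
  · rw [pvS, PySem.Dict.getD_of_get?_eq_some _ _ hg]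
    exact hvals v (List.mem_map_of_mem (PySem.Dict.mem_items_of_get?_eq_some _ hg))

theorem pvNodes_eq_map_range (a : List (Int × List Int)) :
    pvNodes a = (PySem.List.pyRange 0 (pvN a) 1).map (pvNode a) := by
  exact (PySem.List.map_pyGetD_pyRange_zero' (pvNodes a) 0).symm

theorem pvMem_PL (a : List (Int × List Int)) (q : Int × Int) :
    q ∈ pvPL a ↔ 0 ≤ q.1 ∧ q.1 < q.2 ∧ q.2 < pvN a := by
  rw [pvPL, pvMem_pairs _ (PySem.List.pairwise_lt_pyRange_one 0 (pvN a)),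
    PySem.List.mem_pyRange_one, PySem.List.mem_pyRange_one]
  omega

-- values of a dict with distinct keys, read back through getD
theorem pvDict_values {κ ν : Type} [BEq κ] [LawfulBEq κ] (d : PySem.Dict κ ν) (d0 : ν)
    (h : d.keys.Nodup) : d.values = d.keys.map (fun k => d.getD k d0) := by
  have h1 : d.keys.map (fun k => d.getD k d0) = d.items.map (fun p => d.getD p.1 d0) := by
    rw [show d.keys = d.items.map (fun p => p.1) from rfl, List.map_map]
    rfl
  have h2 : d.values = d.items.map (fun p => p.2) := rfl
  rw [h1, h2]
  apply List.map_congr_left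
  intro p hp
  exact (PySem.Dict.getD_of_mem_items d (show (p.1, p.2) ∈ d.items by simpa using hp) h d0).symm

theorem pvFilter_single (l : List Int) (x : Int) (h : l.Nodup) :
    l.filter (fun y => y == x) = if x ∈ l then [x] else [] := by
  induction l with
  | nil => simp
  | cons a t ih =>
    rw [List.nodup_cons] at h
    obtain ⟨ha, ht⟩ := h
    by_cases hax : a = x
    · subst hax
      simp [ih ht, ha]
    · simp only [List.filter_cons, List.mem_cons]
      have : (a == x) = false := by simp [hax]
      rw [this]
      simp only [Bool.false_eq_true, if_false]
      rw [ih ht]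
      by_cases hx : x ∈ t
      · simp [hx]
      · have : ¬ x = a := fun h => hax h.symm
        simp [hx, this]

def pvPairsL (a : List (Int × List Int)) : List (Int × Int) :=
  (PySem.List.pyRange 0 (pvN a) 1).flatMap (fun j => (pvS a j).map (fun c => (c, j)))

theorem pvIncident_eq (a : List (Int × List Int)) :
    pvIncident a = (pvPairsL a).foldl (fun d p => d.modify p.1 [] (· ++ [p.2])) PySem.Dict.empty := by
  rw [pvIncident, PySem.List.enumerate_eq_map_pyRange (pvNodes a) 0, PySem.List.len_eq,
    List.foldl_map, pvPairsL, List.foldl_flatMap]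
  apply PySem.List.foldl_congr_mem
  intro acc j hj
  rw [pvS, pvNode, List.foldl_map]

theorem pvIncident_getD (a : List (Int × List Int)) (c : Int) :
    (pvIncident a).getD c [] = pvInc a c := by
  rw [pvIncident_eq, PySem.Dict.getD_foldl_modify_append, PySem.Dict.getD_empty,
    List.nil_append, pvPairsL]
  have hblock : ∀ j : Int, ((pvS a j).map (fun c' => (c', j))).filter (fun p => p.1 == c)
      = if c ∈ pvS a j then [(c, j)] else [] := by
    intro j
    rw [List.filter_map]
    have hcomp : ((fun p : Int × Int => p.1 == c) ∘ (fun c' => (c', j))) = (fun c' => c' == c) := rfl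
    rw [hcomp, pvFilter_single (pvS a j) c (pvS_nodup a j)]
    by_cases h : c ∈ pvS a j <;> simp [h]
  have hfl : ((PySem.List.pyRange 0 (pvN a) 1).flatMap
        (fun j => (pvS a j).map (fun c' => (c', j)))).filter (fun p => p.1 == c)
      = (PySem.List.pyRange 0 (pvN a) 1).flatMap
        (fun j => if decide (c ∈ pvS a j) then [(c, j)] else []) := by
    rw [List.filter_flatMap]
    apply List.flatMap_congr
    intro j _
    rw [hblock j]
    by_cases h : c ∈ pvS a j <;> simp [h]
  rw [hfl, List.map_flatMap]
  have hfl2 : ∀ j : Int, ((if decide (c ∈ pvS a j) then [(c, j)] else []).map (fun p : Int × Int => p.2))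
      = if decide (c ∈ pvS a j) then [j] else [] := by
    intro j
    by_cases h : c ∈ pvS a j <;> simp [h]
  rw [List.flatMap_congr (fun j _ => hfl2 j),
    pvFlatMap_if (PySem.List.pyRange 0 (pvN a) 1) (fun j => decide (c ∈ pvS a j)) (fun j => j),
    List.map_id', pvInc]

theorem pvIncident_keys (a : List (Int × List Int)) :
    (pvIncident a).keys = pvC a := by
  rw [pvIncident_eq, PySem.Dict.keys_foldl_modify_key (pvPairsL a) (fun p => p.1) []
    (fun d p => fun v => v ++ [p.2]) PySem.Dict.empty]
  have hmap : (pvPairsL a).map (fun p => p.1)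
      = (PySem.List.pyRange 0 (pvN a) 1).flatMap (fun j => pvS a j) := by
    rw [pvPairsL, List.map_flatMap]
    congr 1
    funext j
    rw [List.map_map]
    exact List.map_id _
  rw [hmap, show PySem.Dict.empty.keys = ([] : List Int) from rfl, pvC,
    PySem.Set.ofList_eq_foldl]
  rfl

theorem pvCounts_eq (a : List (Int × List Int)) :
    pvCounts a = PySem.Dict.counter (pvLL a) := by
  have hkn : (pvIncident a).keys.Nodup := by
    rw [pvIncident_keys]; exact PySem.Set.nodup_ofList _
  have hvals : (pvIncident a).values = (pvC a).map (fun c => pvInc a c) := by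
    rw [pvDict_values (pvIncident a) [] hkn, pvIncident_keys]
    exact List.map_congr_left (fun c _ => pvIncident_getD a c)
  rw [pvCounts, hvals, List.foldl_map]
  have hcong : ∀ (cd : PySem.Dict Int Int) (c : Int), c ∈ pvC a →
      (PySem.List.pyRange 0 (((pvInc a c).length : Int) - 1) 1).foldl (fun counts a_ =>
        (PySem.List.pyRange (a_ + 1) (((pvInc a c).length : Int)) 1).foldl (fun counts b =>
          counts.insert (PySem.List.pyGetD (pvInc a c) a_ 0 * pvN a + PySem.List.pyGetD (pvInc a c) b 0)
            ((counts.getD (PySem.List.pyGetD (pvInc a c) a_ 0 * pvN a + PySem.List.pyGetD (pvInc a c) b 0) 0) + 1))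
          counts) cd
      = ((pvPairs (fun x y => [(x,y)]) (pvInc a c)).map (fun q => q.1 * pvN a + q.2)).foldl
          (fun cd p => cd.insert p (cd.getD p 0 + 1)) cd := by
    intro cd c _
    rw [pvPairsLoop (fun cd x y => cd.insert (x * pvN a + y) (cd.getD (x * pvN a + y) 0 + 1))
      (pvInc a c) 0 cd, List.foldl_map]
  rw [PySem.List.foldl_congr_mem _ _ _ _ hcong, ← List.foldl_flatMap]
  exact PySem.Dict.foldl_insert_getD_add_one_eq_counter _

theorem pvMem_inc (a : List (Int × List Int)) (c i : Int) :
    i ∈ pvInc a c ↔ (0 ≤ i ∧ i < pvN a) ∧ c ∈ pvS a i := by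
  simp only [pvInc, List.mem_filter, PySem.List.mem_pyRange_one, decide_eq_true_eq]

theorem pvS_subset_C (a : List (Int × List Int)) (i : Int) (hi : 0 ≤ i) (hin : i < pvN a) :
    ∀ c ∈ pvS a i, c ∈ pvC a := by
  intro c hc
  rw [pvC, PySem.Set.mem_ofList]
  exact List.mem_flatMap.mpr ⟨i, PySem.List.mem_pyRange_one.mpr ⟨hi, hin⟩, hc⟩

theorem pvSum_ite (l : List Int) (p : Int → Bool) :
    (l.map (fun c => if p c then 1 else 0)).sum = l.countP p := by
  induction l with
  | nil => rfl
  | cons x t ih =>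
    rw [List.map_cons, List.sum_cons, ih, List.countP_cons]
    by_cases h : p x <;> simp [h, Nat.add_comm]

-- the accumulated count of an admissible pair equals the intersection size
theorem pvCount_LL (a : List (Int × List Int)) (q : Int × Int) (hq : q ∈ pvPL a) :
    (pvLL a).count (q.1 * pvN a + q.2) = pvWn a q.1 q.2 := by
  obtain ⟨h1, h12, h2n⟩ := (pvMem_PL a q).mp hq
  rw [pvLL, List.count, pvCountP_flatMap]
  have hblock : ∀ c ∈ pvC a,
      ((pvPairs (fun x y => [(x,y)]) (pvInc a c)).map (fun r => r.1 * pvN a + r.2)).countP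
        (fun x => x == q.1 * pvN a + q.2)
      = if c ∈ pvS a q.1 ∧ c ∈ pvS a q.2 then 1 else 0 := by
    intro c _
    have hp_inc : (pvInc a c).Pairwise (· < ·) :=
      (PySem.List.pairwise_lt_pyRange_one 0 (pvN a)).filter _
    have hb : ∀ x ∈ pvInc a c, 0 ≤ x ∧ x < pvN a := by
      intro x hx
      exact ((pvMem_inc a c x).mp hx).1
    have := pvCount_pairs_enc (pvN a) q.1 q.2 (pvInc a c) hp_inc hb h1 h12 h2n
    rw [List.count] at this
    rw [this]
    have hm1 : q.1 ∈ pvInc a c ↔ c ∈ pvS a q.1 := by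
      rw [pvMem_inc]; constructor
      · exact fun h => h.2
      · exact fun h => ⟨⟨h1, by omega⟩, h⟩
    have hm2 : q.2 ∈ pvInc a c ↔ c ∈ pvS a q.2 := by
      rw [pvMem_inc]; constructor
      · exact fun h => h.2
      · exact fun h => ⟨⟨by omega, h2n⟩, h⟩
    by_cases hc1 : c ∈ pvS a q.1 <;> by_cases hc2 : c ∈ pvS a q.2 <;>
      simp [hm1, hm2, hc1, hc2]
  rw [List.map_congr_left hblock]
  have : ((pvC a).map (fun c => if c ∈ pvS a q.1 ∧ c ∈ pvS a q.2 then 1 else 0)).sum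
      = (pvC a).countP (fun c => decide (c ∈ pvS a q.1 ∧ c ∈ pvS a q.2)) := by
    rw [← pvSum_ite (pvC a) (fun c => decide (c ∈ pvS a q.1 ∧ c ∈ pvS a q.2))]
    apply congrArg
    apply List.map_congr_left
    intro c _
    by_cases hc : c ∈ pvS a q.1 ∧ c ∈ pvS a q.2 <;> simp [hc]
  rw [this, List.countP_eq_length_filter]
  have hperm : ((pvC a).filter (fun c => decide (c ∈ pvS a q.1 ∧ c ∈ pvS a q.2))).Perm
      (PySem.Set.inter (pvS a q.1) (pvS a q.2)) := by
    apply (List.perm_ext_iff_of_nodup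
      ((PySem.Set.nodup_ofList _).filter _)
      (PySem.Set.nodup_inter _ _ (pvS_nodup a q.1))).mpr
    intro x
    rw [List.mem_filter, PySem.Set.mem_inter, decide_eq_true_eq]
    constructor
    · exact fun h => h.2
    · intro h
      exact ⟨pvS_subset_C a q.1 h1 (by omega) x h.1, h⟩
  rw [hperm.length_eq, pvWn]

-- every accumulated key is an admissible encoded pair with a positive count
theorem pvMem_LL (a : List (Int × List Int)) (p : Int) (hp : p ∈ pvLL a) :
    ∃ q ∈ pvPL a, p = q.1 * pvN a + q.2 := by
  rw [pvLL] at hp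
  obtain ⟨c, hc, hpc⟩ := List.mem_flatMap.mp hp
  obtain ⟨r, hr, rfl⟩ := List.mem_map.mp hpc
  have hp_inc : (pvInc a c).Pairwise (· < ·) :=
    (PySem.List.pairwise_lt_pyRange_one 0 (pvN a)).filter _
  obtain ⟨hr1, hr2, hr12⟩ := (pvMem_pairs (pvInc a c) hp_inc r).mp hr
  have hb1 := ((pvMem_inc a c r.1).mp hr1).1
  have hb2 := ((pvMem_inc a c r.2).mp hr2).1
  exact ⟨r, (pvMem_PL a r).mpr ⟨hb1.1, hr12, hb2.2⟩, rfl⟩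

theorem pvK_pairwise (a : List (Int × List Int)) : (pvK a).Pairwise (· < ·) := by
  rw [pvK]
  apply List.Pairwise.map
  · intro q r h
    exact h
  have hPL : (pvPL a).Pairwise (fun q r => q.1 < r.1 ∨ (q.1 = r.1 ∧ q.2 < r.2)) :=
    pvPairs_pairwise _ (PySem.List.pairwise_lt_pyRange_one 0 (pvN a))
  have hfil := hPL.filter (fun q => decide (0 < pvWn a q.1 q.2))
  apply List.Pairwise.imp_of_mem ?_ hfil
  intro q r hq hr hlex
  have hqPL := (pvMem_PL a q).mp (List.mem_of_mem_filter hq)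
  have hrPL := (pvMem_PL a r).mp (List.mem_of_mem_filter hr)
  rcases hlex with h | ⟨he, h⟩
  · nlinarith [hqPL.1, hqPL.2.1, hqPL.2.2, hrPL.1, hrPL.2.1, hrPL.2.2]
  · rw [he]; omega

theorem pvSorted_keys (a : List (Int × List Int)) :
    PySem.List.sorted (pvCounts a).keys (fun x => x) false = pvK a := by
  have hkeys : (pvCounts a).keys = PySem.Set.ofList (pvLL a) := by
    rw [pvCounts_eq, PySem.Dict.keys_counter]
  rw [hkeys]
  apply PySem.List.sorted_eq_of_perm_of_pairwise_lt
  · apply (List.perm_ext_iff_of_nodup ?_ (PySem.Set.nodup_ofList _)).mpr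
    · intro p
      rw [PySem.Set.mem_ofList]
      constructor
      · intro hp
        rw [pvK] at hp
        obtain ⟨q, hq, rfl⟩ := List.mem_map.mp hp
        have hqPL := List.mem_of_mem_filter hq
        have hpos : 0 < pvWn a q.1 q.2 := by
          have := (List.mem_filter.mp hq).2
          simpa using this
        rw [← pvCount_LL a q hqPL] at hpos
        exact List.count_pos_iff.mp hpos
      · intro hp
        obtain ⟨q, hqPL, rfl⟩ := pvMem_LL a p hp
        have hpos : 0 < (pvLL a).count (q.1 * pvN a + q.2) := List.count_pos_iff.mpr hp
        rw [pvCount_LL a q hqPL] at hpos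
        rw [pvK]
        exact List.mem_map.mpr ⟨q, List.mem_filter.mpr ⟨hqPL, by simpa using hpos⟩, rfl⟩
    · exact (pvK_pairwise a).imp (fun h => ne_of_lt h)
  · exact pvK_pairwise a

-- normal form of port A
theorem pvA_norm (a : List (Int × List Int)) :
    vmotifs_from_adjacency_list a
      = ((pvPL a).filter (fun q => decide (0 < pvWn a q.1 q.2))).map
          (fun q => (pvNode a q.1, pvNode a q.2, (pvWn a q.1 q.2 : Int))) := by
  have h := pvPairsLoop (fun v x y =>
      if (((PySem.Set.inter ((pvD a).getD x PySem.Set.empty) ((pvD a).getD y PySem.Set.empty)).length : Int)) > 0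
      then v ++ [(x, y, (((PySem.Set.inter ((pvD a).getD x PySem.Set.empty) ((pvD a).getD y PySem.Set.empty)).length : Int)))]
      else v) (pvNodes a) 0 []
  have hA : vmotifs_from_adjacency_list a
      = (pvPairs (fun x y => [(x,y)]) (pvNodes a)).foldl (fun acc q =>
          if (((PySem.Set.inter ((pvD a).getD q.1 PySem.Set.empty) ((pvD a).getD q.2 PySem.Set.empty)).length : Int)) > 0
          then acc ++ [(q.1, q.2, (((PySem.Set.inter ((pvD a).getD q.1 PySem.Set.empty) ((pvD a).getD q.2 PySem.Set.empty)).length : Int)))]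
          else acc) [] := h
  rw [hA, pvNodes_eq_map_range, pvPairs_map, List.foldl_map]
  refine Eq.trans (PySem.List.foldl_congr_mem _ _
    (fun acc q => if decide (0 < pvWn a q.1 q.2) = true
      then acc ++ [(pvNode a q.1, pvNode a q.2, (pvWn a q.1 q.2 : Int))] else acc) _ ?_) ?_
  · intro acc q _
    show (if ((pvWn a q.1 q.2 : Int)) > 0 then acc ++ [(pvNode a q.1, pvNode a q.2, ((pvWn a q.1 q.2 : Int)))] else acc)
      = (if decide (0 < pvWn a q.1 q.2) = true then acc ++ [(pvNode a q.1, pvNode a q.2, ((pvWn a q.1 q.2 : Int)))] else acc)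
    by_cases hw : 0 < pvWn a q.1 q.2
    · rw [if_pos (show ((pvWn a q.1 q.2 : Int)) > 0 by exact_mod_cast hw), if_pos (by simp [hw])]
    · rw [if_neg (show ¬ ((pvWn a q.1 q.2 : Int)) > 0 by exact_mod_cast hw), if_neg (by simp [hw])]
  · rw [PySem.List.foldl_append_if, List.nil_append, pvPL]

-- normal form of port B
theorem pvB_norm (a : List (Int × List Int)) :
    vmotifs_from_adjacency_list_alt a
      = (pvK a).map (fun p => (pvNode a (PySem.Int.floordiv p (pvN a)),
          pvNode a (PySem.Int.mod p (pvN a)), (pvCounts a).getD p 0)) := by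
  have h : vmotifs_from_adjacency_list_alt a
      = (PySem.List.sorted (pvCounts a).keys (fun x => x) false).foldl (fun v p =>
          v ++ [(pvNode a (PySem.Int.floordiv p (pvN a)), pvNode a (PySem.Int.mod p (pvN a)),
            (pvCounts a).getD p 0)]) [] := rfl
  rw [h, pvSorted_keys, PySem.List.foldl_append_singleton_eq_map, List.nil_append]

-- ===== VERDICT (by name: the statement is the Claim_ definition above) =====
theorem vmotifs_from_adjacency_list_spec : Claim_equal_vmotifs_from_adjacency_list := by
  intro a _
  unfold Spec_vmotifs_from_adjacency_list
  rw [pvA_norm, pvB_norm, pvK, List.map_map]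
  apply List.map_congr_left
  intro q hq
  have hqPL := List.mem_of_mem_filter hq
  obtain ⟨h1, h12, h2n⟩ := (pvMem_PL a q).mp hqPL
  have hn : 0 < pvN a := by omega
  have hdiv : PySem.Int.floordiv (q.1 * pvN a + q.2) (pvN a) = q.1 := by
    rw [PySem.Int.floordiv_eq_iff_of_pos hn]
    constructor <;> nlinarith
  have hmod : PySem.Int.mod (q.1 * pvN a + q.2) (pvN a) = q.2 := by
    have hfm := PySem.Int.floordiv_mul_add_mod (q.1 * pvN a + q.2) (pvN a)
    rw [hdiv] at hfm
    linarith
  simp only [Function.comp_apply]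
  rw [hdiv, hmod, pvCounts_eq, PySem.Dict.getD_counter, pvCount_LL a q hqPL]
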